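-- pv_equiv track=rewrite | github.com/arrueegg/collage | collage/layout.py | grid_positions
-- ===== SOURCE A (Python) =====
-- def grid_positions(
--     border: int,
--     cell_w: int,
--     cell_h: int,
--     gap: int,
--     cols: int = 2,
--     rows: int = 2,
-- ) -> list[tuple[int, int]]:
--     """
--     Return (x, y) paste positions for every cell in a cols×rows grid,
--     ordered left-to-right, top-to-bottom.
--     """
--     return [
--         (border + c * (cell_w + gap), border + r * (cell_h + gap))
--         for r in range(rows)
--         for c in range(cols)
--     ]
-- ===== SOURCE B (Python) =====
-- def grid_positions(
--     border: int,
--     cell_w: int,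
--     cell_h: int,
--     gap: int,
--     cols: int = 2,
--     rows: int = 2,
-- ) -> list[tuple[int, int]]:
--     if cols <= 0 or rows <= 0:
--         return []
--     out = []
--     x = border
--     y = border
--     c = 0  # column counter within the current row
--     for _ in range(rows * cols):
--         out.append((x, y))
--         c += 1
--         if c == cols:
--             c = 0
--             x = border
--             y += cell_h + gap
--         else:
--             x += cell_w + gap
--     return out
-- ===== Notes on version B (the rewrite author's own statement) =====
-- stated objective: alternative
-- what changed: Replaces the nested row/column comprehension with its per-cell multiplications by a single flat loop over the total cell count that carries running x/y coordinate accumulators and a column counter, updating them additively at each step.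
import Mathlib
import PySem

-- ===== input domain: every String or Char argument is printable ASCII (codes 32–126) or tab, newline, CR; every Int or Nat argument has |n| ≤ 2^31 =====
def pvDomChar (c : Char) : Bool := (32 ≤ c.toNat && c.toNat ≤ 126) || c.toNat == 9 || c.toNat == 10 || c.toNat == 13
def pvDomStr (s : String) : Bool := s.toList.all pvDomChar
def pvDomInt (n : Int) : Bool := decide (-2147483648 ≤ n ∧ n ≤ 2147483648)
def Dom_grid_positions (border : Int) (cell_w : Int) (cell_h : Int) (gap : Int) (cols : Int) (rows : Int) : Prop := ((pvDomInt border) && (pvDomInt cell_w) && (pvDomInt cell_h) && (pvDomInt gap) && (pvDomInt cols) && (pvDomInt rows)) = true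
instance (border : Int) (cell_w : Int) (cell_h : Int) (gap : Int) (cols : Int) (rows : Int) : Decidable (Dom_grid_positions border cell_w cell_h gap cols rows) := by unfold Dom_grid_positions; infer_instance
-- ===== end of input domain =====

-- B replaces A's nested per-cell multiplicative arithmetic with a single flat loop over the cell count that maintains running x/y accumulators and a column counter additively (objective: alternative).


-- ===== PORT A =====
def grid_positions (border : Int) (cell_w : Int) (cell_h : Int) (gap : Int) (cols : Int) (rows : Int) : List (Int × Int) :=
  (PySem.List.pyRange 0 rows 1).flatMap (fun r =>
    (PySem.List.pyRange 0 cols 1).map (fun c =>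
      (border + c * (cell_w + gap), border + r * (cell_h + gap))))

-- ===== PORT B =====
-- single flat loop over range(rows*cols), state (out, x, y, c) updated additively
def grid_positions_alt (border : Int) (cell_w : Int) (cell_h : Int) (gap : Int) (cols : Int) (rows : Int) : List (Int × Int) :=
  if cols ≤ 0 ∨ rows ≤ 0 then [] else
  ((PySem.List.pyRange 0 (rows * cols) 1).foldl
    (fun (st : List (Int × Int) × Int × Int × Int) (_ : Int) =>
      let out := st.1 ++ [(st.2.1, st.2.2.1)]
      let c := st.2.2.2 + 1
      if c == cols then (out, border, st.2.2.1 + (cell_h + gap), (0 : Int))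
      else (out, st.2.1 + (cell_w + gap), st.2.2.1, c))
    ([], border, border, 0)).1

-- ===== PRECONDITION & SPEC =====
def Spec_grid_positions (border : Int) (cell_w : Int) (cell_h : Int) (gap : Int) (cols : Int) (rows : Int) (out : List (Int × Int)) : Prop := out = grid_positions_alt border cell_w cell_h gap cols rows
instance (border : Int) (cell_w : Int) (cell_h : Int) (gap : Int) (cols : Int) (rows : Int) (out : List (Int × Int)) : Decidable (Spec_grid_positions border cell_w cell_h gap cols rows out) := by unfold Spec_grid_positions; infer_instance

-- ===== CLAIM (what is proved, stated in full; the proofs are below) =====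
def Claim_equal_grid_positions : Prop := ∀ (border : Int) (cell_w : Int) (cell_h : Int) (gap : Int) (cols : Int) (rows : Int), Dom_grid_positions border cell_w cell_h gap cols rows → Spec_grid_positions border cell_w cell_h gap cols rows (grid_positions border cell_w cell_h gap cols rows)

-- ===== LEMMAS AND PROOFS =====

-- loop invariant for B's flat additive loop: after i steps the output is the first i
-- cells (indexed by divmod) and the accumulators hold the coordinates of cell i
lemma gp_inv (border cell_w cell_h gap cols : Int) (colsN : Nat)
    (hcol : cols = (colsN : Int)) (hc : 0 < colsN) (i : Nat) :
    (List.range i).foldl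
      (fun (st : List (Int × Int) × Int × Int × Int) (_ : Nat) =>
        let out := st.1 ++ [(st.2.1, st.2.2.1)]
        let c := st.2.2.2 + 1
        if c == cols then (out, border, st.2.2.1 + (cell_h + gap), (0 : Int))
        else (out, st.2.1 + (cell_w + gap), st.2.2.1, c))
      ([], border, border, 0)
    = ((List.range i).map (fun k =>
          (border + ((k % colsN : Nat) : Int) * (cell_w + gap),
           border + ((k / colsN : Nat) : Int) * (cell_h + gap))),
       border + ((i % colsN : Nat) : Int) * (cell_w + gap),
       border + ((i / colsN : Nat) : Int) * (cell_h + gap),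
       ((i % colsN : Nat) : Int)) := by
  induction i with
  | zero => simp
  | succ i ih =>
      rw [List.range_succ, List.foldl_append, ih, List.map_append]
      simp only [List.foldl_cons, List.foldl_nil]
      have hdm := Nat.div_add_mod i colsN
      have hmlt : i % colsN < colsN := Nat.mod_lt _ hc
      by_cases h : i % colsN + 1 = colsN
      · have hsplit : i + 1 = colsN * (i / colsN + 1) := by
          rw [Nat.mul_add, Nat.mul_one]; omega
        have hmod : (i + 1) % colsN = 0 := by rw [hsplit]; exact Nat.mul_mod_right _ _
        have hdiv : (i + 1) / colsN = i / colsN + 1 := by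
          rw [hsplit]; exact Nat.mul_div_cancel_left _ hc
        have hcond : (((i % colsN : Nat) : Int) + 1 == cols) = true := by
          rw [beq_iff_eq, hcol]; omega
        rw [hcond, if_pos rfl, hmod, hdiv]
        refine Prod.ext rfl (Prod.ext ?_ (Prod.ext ?_ ?_)) <;> push_cast <;> ring
      · have hsplit : i + 1 = colsN * (i / colsN) + (i % colsN + 1) := by omega
        have hmod : (i + 1) % colsN = i % colsN + 1 := by
          rw [hsplit, Nat.mul_add_mod]; exact Nat.mod_eq_of_lt (by omega)
        have hdiv : (i + 1) / colsN = i / colsN := by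
          rw [hsplit, Nat.mul_add_div hc, Nat.div_eq_of_lt (by omega : i % colsN + 1 < colsN), Nat.add_zero]
        have hcond : (((i % colsN : Nat) : Int) + 1 == cols) = false := by
          rw [beq_eq_false_iff_ne, hcol]; omega
        rw [hcond, if_neg (by simp), hmod, hdiv]
        refine Prod.ext rfl (Prod.ext ?_ (Prod.ext ?_ ?_)) <;> push_cast <;> ring

-- A's row-major nested form equals the flat divmod-indexed form
lemma gp_A_eq_map (border cell_w cell_h gap : Int) (rowsN colsN : Nat) (hc : 0 < colsN) :
    (List.range rowsN).flatMap (fun (r : Nat) =>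
      (List.range colsN).map (fun (c : Nat) =>
        (border + (c : Int) * (cell_w + gap), border + (r : Int) * (cell_h + gap))))
    = (List.range (rowsN * colsN)).map (fun k =>
        (border + ((k % colsN : Nat) : Int) * (cell_w + gap),
         border + ((k / colsN : Nat) : Int) * (cell_h + gap))) := by
  induction rowsN with
  | zero => simp
  | succ m ih =>
      rw [List.range_succ, List.flatMap_append, ih,
        show (m + 1) * colsN = m * colsN + colsN by ring, List.range_add,
        List.map_append]
      congr 1
      simp only [List.flatMap_cons, List.flatMap_nil, List.append_nil, List.map_map]
      apply List.map_congr_left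
      intro c hcmem
      have hclt : c < colsN := List.mem_range.mp hcmem
      have hmod : (m * colsN + c) % colsN = c := by
        rw [Nat.mul_comm, Nat.mul_add_mod]; exact Nat.mod_eq_of_lt hclt
      have hdiv : (m * colsN + c) / colsN = m := by
        rw [Nat.mul_comm, Nat.mul_add_div hc, Nat.div_eq_of_lt hclt, Nat.add_zero]
      simp [Function.comp, hmod, hdiv]

-- ===== VERDICT (by name: the statement is the Claim_ definition above) =====
theorem grid_positions_spec : Claim_equal_grid_positions := by
  intro border cell_w cell_h gap cols rows _
  unfold Spec_grid_positions grid_positions grid_positions_alt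
  split_ifs with h
  · rcases h with h | h <;>
      simp [PySem.List.pyRange_one, Int.toNat_of_nonpos (by omega : _ ≤ 0)] <;> intros <;> omega
  rw [not_or] at h
  simp only [not_le] at h
  obtain ⟨hcpos, hrpos⟩ := h
  have hcol : cols = (cols.toNat : Int) := (Int.toNat_of_nonneg (by omega)).symm
  have hrow : rows = (rows.toNat : Int) := (Int.toNat_of_nonneg (by omega)).symm
  have hcN : 0 < cols.toNat := by omega
  have htot : (rows * cols - 0).toNat = rows.toNat * cols.toNat := by
    conv_lhs => rw [Int.sub_zero, hcol, hrow, ← Int.natCast_mul, Int.toNat_natCast]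
  rw [PySem.List.pyRange_one, PySem.List.pyRange_one, PySem.List.pyRange_one,
    htot, List.foldl_map]
  simp only [Int.sub_zero, Int.zero_add, List.flatMap_map, List.map_map, Function.comp_def]
  rw [gp_inv border cell_w cell_h gap cols cols.toNat hcol hcN]
  exact gp_A_eq_map border cell_w cell_h gap rows.toNat cols.toNat hcN
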